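-- pv_equiv track=rewrite | github.com/zenium/playground | python/dynaList.py | dynaList
-- ===== SOURCE A (Python) =====
-- from typing import List
--
-- def dynaList(l1: List[int], l2: List[int]) -> List[int]:
--     i = j = 0
--     while i < len(l1):
--         if i % 2 and j < len(l2):
--             l1.insert(i, l2[j])
--             j += 1
--         i += 1
--     if j < len(l2):
--         l1 += l2[j:]
--     return l1
-- ===== SOURCE B (Python) =====
-- from typing import List
--
-- # One-pass closed-form interleave: k = min(len(l1), len(l2)) pairs, then both tails.
-- # Like A, mutates l1 in place (l1[:] = out) and returns it.
-- def dynaList(l1: List[int], l2: List[int]) -> List[int]: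
--     k = min(len(l1), len(l2))
--     out = [v for pair in zip(l1, l2) for v in pair]
--     out += l1[k:]
--     out += l2[k:]
--     l1[:] = out
--     return l1
-- ===== Notes on version B (the rewrite author's own statement) =====
-- stated objective: faster
-- what changed: replaces the quadratic while-loop that repeatedly calls l1.insert (each insert shifts the tail) by a single pass building the interleaved list from zip(l1,l2) plus the two leftover tails
import Mathlib
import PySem

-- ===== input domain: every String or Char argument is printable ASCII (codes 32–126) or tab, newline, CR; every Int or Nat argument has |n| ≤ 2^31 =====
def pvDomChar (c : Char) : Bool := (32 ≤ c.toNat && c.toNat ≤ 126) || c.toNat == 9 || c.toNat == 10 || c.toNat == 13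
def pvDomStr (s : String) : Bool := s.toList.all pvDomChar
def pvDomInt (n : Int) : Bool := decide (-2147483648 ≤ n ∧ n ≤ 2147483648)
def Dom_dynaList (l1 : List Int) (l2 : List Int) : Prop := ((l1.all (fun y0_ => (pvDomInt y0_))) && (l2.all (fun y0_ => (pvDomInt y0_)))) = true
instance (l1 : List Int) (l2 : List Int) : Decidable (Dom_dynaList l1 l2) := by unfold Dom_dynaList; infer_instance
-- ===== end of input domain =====

-- B replaces A's quadratic insert-in-place loop by a one-pass zip interleave (faster, asymptotic);
-- both mutate l1 in Python (A via insert/+=, B via l1[:] = out), equivalence here is about the return value.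


-- ===== PORT A =====
-- the while-loop: state (l1, j), counters i, j; inserts l2[j] at odd i.
-- fuel is only a totality guard: (l1.length - i) + (l2.length - j) strictly decreases each
-- iteration, so with the initial fuel below the loop always exits via the i < len(l1) test.
def dynaListLoop (fuel : Nat) (l1 l2 : List Int) (i j : Nat) : List Int × Nat :=
  match fuel with
  | 0 => (l1, j)
  | fuel' + 1 =>
    if i < l1.length then
      if i % 2 = 1 ∧ j < l2.length then
        dynaListLoop fuel' (PySem.List.insert l1 (i : Int) (l2.getD j 0)) l2 (i+1) (j+1)
      else
        dynaListLoop fuel' l1 l2 (i+1) j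
    else (l1, j)

def dynaList (l1 : List Int) (l2 : List Int) : List Int :=
  let r := dynaListLoop (l1.length + l2.length) l1 l2 0 0
  if r.2 < l2.length then r.1 ++ l2.drop r.2 else r.1

-- ===== PORT B =====
def dynaList_alt (l1 : List Int) (l2 : List Int) : List Int :=
  let k := min l1.length l2.length
  ((l1.zip l2).flatMap (fun p => [p.1, p.2])) ++ l1.drop k ++ l2.drop k

-- ===== PRECONDITION & SPEC =====
def Spec_dynaList (l1 : List Int) (l2 : List Int) (out : List Int) : Prop := out = dynaList_alt l1 l2
instance (l1 : List Int) (l2 : List Int) (out : List Int) : Decidable (Spec_dynaList l1 l2 out) := by unfold Spec_dynaList; infer_instance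

-- ===== CLAIM (what is proved, stated in full; the proofs are below) =====
def Claim_equal_dynaList : Prop := ∀ (l1 : List Int) (l2 : List Int), Dom_dynaList l1 l2 → Spec_dynaList l1 l2 (dynaList l1 l2)

-- ===== LEMMAS AND PROOFS =====

-- proof-only reference function: the plain interleave both programs compute
def interAB : List Int → List Int → List Int
  | [], c => c
  | x::a, [] => x::a
  | x::a, y::c => x :: y :: interAB a c

-- B computes interAB
lemma alt_eq_inter : ∀ (l1 l2 : List Int), dynaList_alt l1 l2 = interAB l1 l2 := by
  intro l1
  induction l1 with
  | nil => intro l2; simp [dynaList_alt, interAB]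
  | cons x a ih =>
    intro l2
    cases l2 with
    | nil => simp [dynaList_alt, interAB]
    | cons y c =>
      have h := ih c
      simp only [dynaList_alt] at h ⊢
      simp only [List.zip_cons_cons, List.flatMap_cons, List.length_cons,
        Nat.succ_min_succ, List.drop_succ_cons, List.cons_append, List.append_assoc] at h ⊢
      simp [h, interAB]

-- once l2 is exhausted the loop only walks i to the end, changing nothing
lemma loop_done (l2 : List Int) (j : Nat) (h : l2.length ≤ j) :
    ∀ (fuel : Nat) (l1 : List Int) (i : Nat), l1.length - i ≤ fuel →
    dynaListLoop fuel l1 l2 i j = (l1, j) := by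
  intro fuel
  induction fuel with
  | zero => intro l1 i hf; rfl
  | succ f ihf =>
    intro l1 i hf
    rw [dynaListLoop]
    by_cases hi : i < l1.length
    · rw [if_pos hi, if_neg (by omega)]
      exact ihf l1 (i+1) (by omega)
    · rw [if_neg hi]

-- loop invariant + the trailing slice append: at even position 2*j, prefix already built
lemma loop_post (l2 : List Int) : ∀ (a pref : List Int) (fuel j : Nat),
    pref.length = 2*j → j ≤ l2.length → a.length + (l2.length - j) ≤ fuel →
    (if (dynaListLoop fuel (pref ++ a) l2 (2*j) j).2 < l2.length
     then (dynaListLoop fuel (pref ++ a) l2 (2*j) j).1 ++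
            l2.drop (dynaListLoop fuel (pref ++ a) l2 (2*j) j).2
     else (dynaListLoop fuel (pref ++ a) l2 (2*j) j).1)
    = pref ++ interAB a (l2.drop j) := by
  intro a
  induction a with
  | nil =>
    intro pref fuel j hp hj hf
    have hstop : dynaListLoop fuel (pref ++ []) l2 (2*j) j = (pref ++ [], j) := by
      cases fuel with
      | zero => rfl
      | succ f => rw [dynaListLoop, if_neg (by simp [hp])]
    rw [hstop]
    by_cases hjm : j < l2.length
    · simp [hjm, interAB]
    · have hj' : j = l2.length := le_antisymm hj (not_lt.mp hjm)
      simp [interAB, hj']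
  | cons x a' ih =>
    intro pref fuel j hp hj hf
    cases fuel with
    | zero => exact absurd hf (by simp)
    | succ f =>
    have e1 : dynaListLoop (f+1) (pref ++ x::a') l2 (2*j) j
        = dynaListLoop f (pref ++ x::a') l2 (2*j+1) j := by
      rw [dynaListLoop]
      rw [if_pos (show 2*j < (pref ++ x::a').length by simp [hp])]
      rw [if_neg (show ¬((2*j) % 2 = 1 ∧ j < l2.length) by omega)]
    rw [e1]
    by_cases hjm : j < l2.length
    · have hdrop : l2.drop j = l2.getD j 0 :: l2.drop (j+1) := by
        rw [List.drop_eq_getElem_cons hjm, List.getD_eq_getElem _ _ hjm]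
      cases a' with
      | nil =>
        cases f with
        | zero => exact absurd hf (by simp; omega)
        | succ f' =>
        have e2 : dynaListLoop (f'+1) (pref ++ [x]) l2 (2*j+1) j = (pref ++ [x], j) := by
          rw [dynaListLoop]
          rw [if_neg (show ¬(2*j+1 < (pref ++ [x]).length) by simp [hp])]
        rw [e2, hdrop]
        simp [hjm, interAB]
      | cons y a'' =>
        cases f with
        | zero => exact absurd hf (by simp; omega)
        | succ f' =>
        have hins : PySem.List.insert (pref ++ x::y::a'') ((2*j+1 : Nat) : Int) (l2.getD j 0)
            = (pref ++ [x, l2.getD j 0]) ++ y::a'' := by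
          rw [PySem.List.insert_natCast _ (2*j+1) _ (by simp [hp])]
          have hone : 2*j+1 - pref.length = 1 := by omega
          have h1 : (pref ++ x::y::a'').take (2*j+1) = pref ++ [x] := by
            rw [List.take_append, hone, List.take_of_length_le (by omega)]
            rfl
          have h2 : (pref ++ x::y::a'').drop (2*j+1) = y::a'' := by
            rw [List.drop_append, hone, List.drop_of_length_le (by omega)]
            rfl
          simp [h1, h2]
        have e2 : dynaListLoop (f'+1) (pref ++ x::y::a'') l2 (2*j+1) j
            = dynaListLoop f' ((pref ++ [x, l2.getD j 0]) ++ y::a'') l2 (2*j+1+1) (j+1) := by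
          rw [dynaListLoop]
          rw [if_pos (show 2*j+1 < (pref ++ x::y::a'').length by simp [hp])]
          rw [if_pos ⟨by omega, hjm⟩]
          rw [hins]
        rw [e2]
        have hrec := ih (pref ++ [x, l2.getD j 0]) f' (j+1)
          (by simp [hp]; ring) (by omega) (by simp at hf ⊢; omega)
        rw [show 2*(j+1) = 2*j+1+1 by ring] at hrec
        rw [hrec, hdrop]
        simp [interAB]
    · rw [loop_done l2 j (not_lt.mp hjm) f (pref ++ x::a') (2*j+1) (by simp at hf; simp [hp]; omega)]
      have hj' : j = l2.length := le_antisymm hj (not_lt.mp hjm)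
      simp [hj', interAB]

-- ===== VERDICT (by name: the statement is the Claim_ definition above) =====
theorem dynaList_spec : Claim_equal_dynaList := by
  intro l1 l2 _
  show dynaList l1 l2 = dynaList_alt l1 l2
  have h := loop_post l2 l1 [] (l1.length + l2.length) 0 rfl (Nat.zero_le _) (by omega)
  simp only [List.nil_append, Nat.mul_zero, List.drop_zero] at h
  rw [alt_eq_inter]
  simpa [dynaList] using h
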